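-- pv_equiv track=rewrite | github.com/tomasmor42/timeseries_segmentation | timeseries_segmentation.py | get_min_demand_interval_length
-- ===== SOURCE A (Python) =====
-- def get_min_demand_interval_length(non_zero_indexes):
--   min_interval_lenght = 0
--   cur = 1
--   for i in range(1, len(non_zero_indexes)):
--     if non_zero_indexes[i] - non_zero_indexes[i-1] == 1:
--       cur += 1
--     else:
--       if min_interval_lenght > cur or min_interval_lenght == 0:
--         min_interval_lenght = cur
--       cur = 1
--   if min_interval_lenght > cur:
--         min_interval_lenght = cur
--   return min_interval_lenght
-- ===== SOURCE B (Python) =====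
-- def get_min_demand_interval_length(non_zero_indexes):
--     n = len(non_zero_indexes)
--     if n == 0:
--         return 0
--     breaks = ([0]
--               + [i for i in range(1, n)
--                  if non_zero_indexes[i] - non_zero_indexes[i - 1] != 1]
--               + [n])
--     return min(b - a for a, b in zip(breaks, breaks[1:]))
-- ===== Notes on version B (the rewrite author's own statement) =====
-- stated objective: alternative
-- what changed: B keeps no running run-length counter at all: it computes the list of run-boundary INDICES (0, every position where the adjacent difference is not 1, and n) and returns the minimum pairwise difference of consecutive boundaries, replacing A's per-element (sentinel-min, current-length) state machine by index arithmetic on boundary positions; it also fixes A's single-run quirk (see differs).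
-- intended difference: On nonempty inputs forming a single consecutive run (all adjacent differences equal 1) A returns 0 because its final update lacks the 'or min_interval_lenght == 0' clause its in-loop update has, while B returns the run's length, which is the intended minimum interval length. — e.g. on get_min_demand_interval_length([3, 4]): A returns 0, B returns 2
import Mathlib
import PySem

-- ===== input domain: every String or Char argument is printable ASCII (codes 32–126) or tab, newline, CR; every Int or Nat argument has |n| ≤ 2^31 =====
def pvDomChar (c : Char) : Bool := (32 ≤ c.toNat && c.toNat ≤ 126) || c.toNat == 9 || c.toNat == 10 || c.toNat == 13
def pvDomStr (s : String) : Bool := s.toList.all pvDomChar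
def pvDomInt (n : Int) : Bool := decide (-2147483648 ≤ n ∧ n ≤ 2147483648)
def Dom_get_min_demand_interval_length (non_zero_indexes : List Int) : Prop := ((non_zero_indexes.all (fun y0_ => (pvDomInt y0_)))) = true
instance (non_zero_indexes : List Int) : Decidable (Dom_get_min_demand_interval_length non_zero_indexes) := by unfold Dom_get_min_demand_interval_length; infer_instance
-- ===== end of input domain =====

-- B drops A's running (sentinel-min, current-length) state machine entirely: it builds the list of
-- run-boundary indices and takes the minimum pairwise difference of consecutive boundaries
-- (objective: alternative); on single-run inputs B returns the run's length, not 0 (see D_ below).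

-- ===== PORT A =====
def get_min_demand_interval_length (non_zero_indexes : List Int) : Int :=
  -- min_interval_lenght = 0; cur = 1; for i in range(1, len(...)): ...
  let s := (PySem.List.pyRange 1 (non_zero_indexes.length : Int) 1).foldl
    (fun (st : Int × Int) i =>
      if PySem.List.pyGetD non_zero_indexes i 0 - PySem.List.pyGetD non_zero_indexes (i - 1) 0 = 1 then
        (st.1, st.2 + 1)
      else
        ((if st.1 > st.2 ∨ st.1 = 0 then st.2 else st.1), 1))
    (0, 1)
  -- if min_interval_lenght > cur: min_interval_lenght = cur
  if s.1 > s.2 then s.2 else s.1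

-- ===== PORT B =====
def get_min_demand_interval_length_alt (non_zero_indexes : List Int) : Int :=
  let n : Int := non_zero_indexes.length
  if n = 0 then 0
  else
    -- breaks = [0] + [i for i in range(1, n) if xs[i] - xs[i-1] != 1] + [n]
    let breaks : List Int :=
      (0 :: (PySem.List.pyRange 1 n 1).filter
          (fun i => decide (PySem.List.pyGetD non_zero_indexes i 0 - PySem.List.pyGetD non_zero_indexes (i - 1) 0 ≠ 1)))
        ++ [n]
    -- min(b - a for a, b in zip(breaks, breaks[1:])); breaks has ≥ 2 elements, never empty
    (PySem.List.min? ((breaks.zip (PySem.List.slice breaks (some 1) none)).map (fun p => p.2 - p.1)) id).getD 0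

-- ===== PRECONDITION & SPEC =====
-- On nonempty inputs forming a single consecutive run (all adjacent differences = 1) A returns 0,
-- because its final update lacks the 'or min_interval_lenght == 0' clause its in-loop update has,
-- while B returns the run's length, the intended minimum interval length.
def D_get_min_demand_interval_length (non_zero_indexes : List Int) : Prop :=
  non_zero_indexes ≠ [] ∧ ∀ p ∈ non_zero_indexes.zip non_zero_indexes.tail, p.2 - p.1 = 1
instance (non_zero_indexes : List Int) : Decidable (D_get_min_demand_interval_length non_zero_indexes) := by
  unfold D_get_min_demand_interval_length; infer_instance

def Spec_get_min_demand_interval_length (non_zero_indexes : List Int) (out : Int) : Prop :=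
  ¬ D_get_min_demand_interval_length non_zero_indexes → out = get_min_demand_interval_length_alt non_zero_indexes
instance (non_zero_indexes : List Int) (out : Int) : Decidable (Spec_get_min_demand_interval_length non_zero_indexes out) := by
  unfold Spec_get_min_demand_interval_length; infer_instance

def pvDiffWitness_get_min_demand_interval_length : List Int := [3, 4]
def pvDiffWitnessOut_get_min_demand_interval_length : Int × Int := (0, 2)

-- ===== CLAIM (what is proved, stated in full; the proofs are below) =====
def Claim_unchanged_get_min_demand_interval_length : Prop := ∀ (non_zero_indexes : List Int), Dom_get_min_demand_interval_length non_zero_indexes → Spec_get_min_demand_interval_length non_zero_indexes (get_min_demand_interval_length non_zero_indexes)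
def Claim_changed_get_min_demand_interval_length : Prop := Dom_get_min_demand_interval_length (pvDiffWitness_get_min_demand_interval_length) ∧ D_get_min_demand_interval_length (pvDiffWitness_get_min_demand_interval_length) ∧ get_min_demand_interval_length (pvDiffWitness_get_min_demand_interval_length) = pvDiffWitnessOut_get_min_demand_interval_length.1 ∧ get_min_demand_interval_length_alt (pvDiffWitness_get_min_demand_interval_length) = pvDiffWitnessOut_get_min_demand_interval_length.2 ∧ pvDiffWitnessOut_get_min_demand_interval_length.1 ≠ pvDiffWitnessOut_get_min_demand_interval_length.2
def Claim_exact_get_min_demand_interval_length : Prop := ∀ (non_zero_indexes : List Int), Dom_get_min_demand_interval_length non_zero_indexes → D_get_min_demand_interval_length non_zero_indexes → get_min_demand_interval_length non_zero_indexes ≠ get_min_demand_interval_length_alt non_zero_indexes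

-- ===== LEMMAS AND PROOFS =====

-- A's loop body, on a (previous, next) pair
def pvStepA (st : Int × Int) (p : Int × Int) : Int × Int :=
  if p.2 - p.1 = 1 then (st.1, st.2 + 1) else ((if st.1 > st.2 ∨ st.1 = 0 then st.2 else st.1), 1)

-- the run lengths determined by a list of adjacent pairs, given the current run length
def pvRuns (cur : Int) : List (Int × Int) → List Int
  | [] => [cur]
  | p :: t => if p.2 - p.1 = 1 then pvRuns (cur + 1) t else cur :: pvRuns 1 t

-- positions (0-based, into the pair list) of the run breaks
def pvBadIdx : List (Int × Int) → List Nat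
  | [] => []
  | p :: t => if p.2 - p.1 = 1 then (pvBadIdx t).map (· + 1) else 0 :: (pvBadIdx t).map (· + 1)

-- pairwise differences of consecutive elements
def pvDiffs (L : List Int) : List Int := (L.zip L.tail).map (fun p => p.2 - p.1)

lemma pvRuns_ne_nil (cur : Int) (P : List (Int × Int)) : pvRuns cur P ≠ [] := by
  induction P generalizing cur with
  | nil => simp [pvRuns]
  | cons p t ih => by_cases h : p.2 - p.1 = 1 <;> simp [pvRuns, h, ih]

lemma pv_pairs_eq (xs : List Int) :
    (List.range (xs.length - 1)).map (fun k => (xs.getD k 0, xs.getD (k + 1) 0)) = xs.zip xs.tail := by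
  apply List.ext_getElem
  · simp [List.length_tail]
  · intro i h1 h2
    simp only [List.getElem_map, List.getElem_range, List.getElem_zip, List.getElem_tail]
    have hlen : i + 1 < xs.length := by simp at h1; omega
    rw [List.getD_eq_getElem xs 0 (by omega), List.getD_eq_getElem xs 0 hlen]

lemma pvA_eq (xs : List Int) :
    get_min_demand_interval_length xs =
      (if ((xs.zip xs.tail).foldl pvStepA (0, 1)).1 > ((xs.zip xs.tail).foldl pvStepA (0, 1)).2
       then ((xs.zip xs.tail).foldl pvStepA (0, 1)).2
       else ((xs.zip xs.tail).foldl pvStepA (0, 1)).1) := by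
  rw [← pv_pairs_eq xs]
  unfold get_min_demand_interval_length
  rw [PySem.List.pyRange_one, List.foldl_map, List.foldl_map]
  have hM : (((xs.length : Int) - 1)).toNat = xs.length - 1 := by omega
  rw [hM]
  have hfun : (fun (st : Int × Int) (k : Nat) =>
      if PySem.List.pyGetD xs (1 + (k : Int)) 0 - PySem.List.pyGetD xs (1 + (k : Int) - 1) 0 = 1 then
        (st.1, st.2 + 1)
      else ((if st.1 > st.2 ∨ st.1 = 0 then st.2 else st.1), 1)) =
      (fun (st : Int × Int) (k : Nat) => pvStepA st (xs.getD k 0, xs.getD (k + 1) 0)) := by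
    funext st k
    have h1 : (1 : Int) + (k : Int) = ((k + 1 : Nat) : Int) := by omega
    rw [h1]
    simp only [pvStepA, PySem.List.pyGetD_natCast]
    have h3 : ((k + 1 : Nat) : Int) - 1 = ((k : Nat) : Int) := by omega
    rw [h3, PySem.List.pyGetD_natCast]
  rw [hfun]

lemma pvDiffs_cons_cons (x y : Int) (L : List Int) :
    pvDiffs (x :: y :: L) = (y - x) :: pvDiffs (y :: L) := by
  simp [pvDiffs]

-- the pairwise differences of the boundary list are exactly the run lengths
lemma pv_diffs_runs (P : List (Int × Int)) : ∀ (a cur : Int),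
    pvDiffs (a :: ((pvBadIdx P).map (fun (k : Nat) => a + cur + (k : Int)) ++ [a + cur + (P.length : Int)]))
      = pvRuns cur P := by
  induction P with
  | nil =>
    intro a cur
    simp only [pvBadIdx, List.length_nil, Nat.cast_zero, pvRuns, pvDiffs]
    simp
  | cons p t ih =>
    intro a cur
    by_cases h : p.2 - p.1 = 1
    · have hmap : (pvBadIdx (p :: t)).map (fun (k : Nat) => a + cur + (k : Int))
          = (pvBadIdx t).map (fun (k : Nat) => a + (cur + 1) + (k : Int)) := by
        simp only [pvBadIdx, if_pos h, List.map_map]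
        apply List.map_congr_left
        intro k _
        simp only [Function.comp]
        push_cast
        ring
      have hend : a + cur + ((p :: t).length : Int) = a + (cur + 1) + (t.length : Int) := by
        simp only [List.length_cons]
        push_cast
        ring
      rw [hmap, hend, ih a (cur + 1)]
      simp [pvRuns, h]
    · have hmap : (pvBadIdx (p :: t)).map (fun (k : Nat) => a + cur + (k : Int))
          = (a + cur) :: (pvBadIdx t).map (fun (k : Nat) => (a + cur) + 1 + (k : Int)) := by
        simp only [pvBadIdx, if_neg h, List.map_cons, List.map_map, Nat.cast_zero]
        refine congrArg₂ List.cons (by ring) ?_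
        apply List.map_congr_left
        intro k _
        simp only [Function.comp]
        push_cast
        ring
      have hend : a + cur + ((p :: t).length : Int) = (a + cur) + 1 + (t.length : Int) := by
        simp only [List.length_cons]
        push_cast
        ring
      rw [hmap, hend, List.cons_append]
      rw [pvDiffs_cons_cons, ih (a + cur) 1]
      simp only [pvRuns, if_neg h]
      congr 1
      ring

-- filtering the index range by "break at k" yields the break positions
lemma pv_filter_badIdx (P : List (Int × Int)) : ∀ (f : Nat → Bool),
    (∀ k, (h : k < P.length) → f k = decide (¬ (P[k].2 - P[k].1 = 1))) →
    (List.range P.length).filter f = pvBadIdx P := by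
  induction P with
  | nil => intro f _; simp [pvBadIdx]
  | cons p t ih =>
    intro f hf
    rw [List.length_cons, List.range_succ_eq_map, List.filter_cons, List.filter_map]
    have hsucc : (List.range t.length).filter (f ∘ Nat.succ) = pvBadIdx t := by
      apply ih
      intro k hk
      have := hf (k + 1) (by simpa using Nat.succ_lt_succ hk)
      simpa using this
    have h0 := hf 0 (by simp)
    simp only [List.getElem_cons_zero] at h0
    by_cases h : p.2 - p.1 = 1
    · have : f 0 = false := by rw [h0]; simp [h]
      simp only [this, hsucc, pvBadIdx, if_pos h]
      congr 1
    · have : f 0 = true := by rw [h0]; simp [h]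
      simp only [this, hsucc, pvBadIdx, if_neg h]
      congr 2

lemma pv_min?_cons (rs : List Int) : ∀ (r : Int),
    PySem.List.min? (r :: rs) id = some (rs.foldl min r) := by
  induction rs with
  | nil => intro r; rfl
  | cons x t ih =>
    intro r
    simp only [PySem.List.min?, List.foldl_cons, id] at ih ⊢
    split_ifs with hxr
    · rw [min_eq_right (le_of_lt hxr)]
      exact ih x
    · rw [min_eq_left (by omega : r ≤ x)]
      exact ih r

lemma pvB_eq (xs : List Int) (h : xs ≠ []) :
    get_min_demand_interval_length_alt xs =
      (match pvRuns 1 (xs.zip xs.tail) with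
       | [] => 0
       | r :: rs => rs.foldl min r) := by
  have hlen : 0 < xs.length := List.length_pos_iff.mpr h
  have hne : ¬ ((xs.length : Int) = 0) := by exact_mod_cast Nat.pos_iff_ne_zero.mp hlen
  have hP : (xs.zip xs.tail).length = xs.length - 1 := by
    simp [List.length_zip, List.length_tail]
  have hM : (((xs.length : Int) - 1)).toNat = xs.length - 1 := by omega
  -- identify the filtered range with the break positions of the pair list
  have hfilter : (List.range (xs.length - 1)).filter
      ((fun i => decide (PySem.List.pyGetD xs i 0 - PySem.List.pyGetD xs (i - 1) 0 ≠ 1)) ∘ (fun (k : Nat) => 1 + (k : Int)))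
      = pvBadIdx (xs.zip xs.tail) := by
    rw [← hP]
    apply pv_filter_badIdx
    intro k hk
    have hk' : k + 1 < xs.length := by omega
    have h1 : (1 : Int) + (k : Int) = ((k + 1 : Nat) : Int) := by omega
    have e1 : PySem.List.pyGetD xs (1 + (k : Int)) 0 = xs.getD (k + 1) 0 := by
      rw [h1, PySem.List.pyGetD_natCast]
    have e2 : PySem.List.pyGetD xs (1 + (k : Int) - 1) 0 = xs.getD k 0 := by
      have h3 : (1 : Int) + (k : Int) - 1 = ((k : Nat) : Int) := by omega
      rw [h3, PySem.List.pyGetD_natCast]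
    simp only [Function.comp, List.getElem_zip, List.getElem_tail, e1, e2,
      List.getD_eq_getElem xs 0 hk', List.getD_eq_getElem xs 0 (show k < xs.length by omega)]
  simp only [get_min_demand_interval_length_alt]
  rw [if_neg hne]
  rw [PySem.List.pyRange_one, List.filter_map, hM, hfilter, PySem.List.slice_from_one]
  simp only [List.cons_append, List.tail_cons]
  -- rewrite the boundary list into the shape of pv_diffs_runs (a = 0, cur = 1)
  have hmap : (pvBadIdx (xs.zip xs.tail)).map (fun (k : Nat) => 1 + (k : Int))
      = (pvBadIdx (xs.zip xs.tail)).map (fun (k : Nat) => 0 + 1 + (k : Int)) := by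
    apply List.map_congr_left; intro k _; ring
  have hend : (xs.length : Int) = 0 + 1 + (((xs.zip xs.tail).length : Nat) : Int) := by
    rw [hP]; omega
  rw [hmap, hend]
  have hdiffs := pv_diffs_runs (xs.zip xs.tail) 0 1
  unfold pvDiffs at hdiffs
  simp only [List.tail_cons] at hdiffs
  rw [hdiffs]
  obtain ⟨r, rs, hcons⟩ : ∃ r rs, pvRuns 1 (xs.zip xs.tail) = r :: rs := by
    cases hp : pvRuns 1 (xs.zip xs.tail) with
    | nil => exact absurd hp (pvRuns_ne_nil 1 _)
    | cons a b => exact ⟨a, b, rfl⟩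
  rw [hcons, pv_min?_cons, Option.getD_some]

lemma pvA_inv (P : List (Int × Int)) :
    ∀ (mn cur : Int), 0 < mn → 0 < cur →
    (if (P.foldl pvStepA (mn, cur)).1 > (P.foldl pvStepA (mn, cur)).2
     then (P.foldl pvStepA (mn, cur)).2
     else (P.foldl pvStepA (mn, cur)).1) = (pvRuns cur P).foldl min mn := by
  induction P with
  | nil =>
    intro mn cur hmn hcur
    simp only [List.foldl_nil, pvRuns, List.foldl_cons]
    rcases lt_or_ge cur mn with h | h <;> simp [min_def] <;> omega
  | cons p t ih =>
    intro mn cur hmn hcur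
    by_cases h : p.2 - p.1 = 1
    · simp only [List.foldl_cons, pvStepA, if_pos h, pvRuns, ih mn (cur + 1) hmn (by omega)]
    · have hbr : pvStepA (mn, cur) p = (min mn cur, 1) := by
        simp only [pvStepA, if_neg h]
        have : ¬ mn = 0 := by omega
        rcases lt_or_ge cur mn with h2 | h2 <;> simp [min_def, this] <;> omega
      simp only [List.foldl_cons, hbr, pvRuns, if_neg h, List.foldl_cons]
      exact ih (min mn cur) 1 (lt_min hmn hcur) (by omega)

lemma pvA_zero (P : List (Int × Int)) :
    ∀ (cur : Int), 0 < cur →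
    (if (P.foldl pvStepA (0, cur)).1 > (P.foldl pvStepA (0, cur)).2
     then (P.foldl pvStepA (0, cur)).2
     else (P.foldl pvStepA (0, cur)).1) =
      (match pvRuns cur P with
       | [] => 0
       | [_] => 0
       | r :: rs => rs.foldl min r) := by
  induction P with
  | nil =>
    intro cur hcur
    simp [pvRuns, show ¬ (0 : Int) > cur by omega]
  | cons p t ih =>
    intro cur hcur
    by_cases h : p.2 - p.1 = 1
    · simp only [List.foldl_cons, pvStepA, if_pos h, pvRuns, ih (cur + 1) (by omega)]
    · have hbr : pvStepA (0, cur) p = (cur, 1) := by simp [pvStepA, if_neg h]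
      simp only [List.foldl_cons, hbr, pvRuns, if_neg h]
      rw [pvA_inv t cur 1 hcur (by omega)]
      obtain ⟨r, rs, hcons⟩ : ∃ r rs, pvRuns 1 t = r :: rs := by
        cases hp : pvRuns 1 t with
        | nil => exact absurd hp (pvRuns_ne_nil 1 _)
        | cons a b => exact ⟨a, b, rfl⟩
      rw [hcons]

lemma pvRuns_all_good (P : List (Int × Int)) :
    ∀ (cur : Int), (∀ p ∈ P, p.2 - p.1 = 1) → pvRuns cur P = [cur + (P.length : Int)] := by
  induction P with
  | nil => intro cur _; simp [pvRuns]
  | cons p t ih =>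
    intro cur hall
    have hp : p.2 - p.1 = 1 := hall p (by simp)
    have ht : ∀ q ∈ t, q.2 - q.1 = 1 := fun q hq => hall q (by simp [hq])
    simp only [pvRuns, if_pos hp, ih (cur + 1) ht, List.length_cons]
    congr 1
    push_cast
    ring

lemma pvRuns_has_two (P : List (Int × Int)) :
    ∀ (cur : Int), (∃ p ∈ P, p.2 - p.1 ≠ 1) → ∃ r r' rs, pvRuns cur P = r :: r' :: rs := by
  induction P with
  | nil => intro cur h; simp at h
  | cons p t ih =>
    intro cur h
    by_cases hp : p.2 - p.1 = 1
    · have ht : ∃ q ∈ t, q.2 - q.1 ≠ 1 := by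
        obtain ⟨q, hq, hqd⟩ := h
        rcases List.mem_cons.mp hq with rfl | hq'
        · exact absurd hp hqd
        · exact ⟨q, hq', hqd⟩
      obtain ⟨r, r', rs, hr⟩ := ih (cur + 1) ht
      exact ⟨r, r', rs, by simpa [pvRuns, hp] using hr⟩
    · obtain ⟨r, rs, hr⟩ : ∃ r rs, pvRuns 1 t = r :: rs := by
        cases hp2 : pvRuns 1 t with
        | nil => exact absurd hp2 (pvRuns_ne_nil 1 _)
        | cons a b => exact ⟨a, b, rfl⟩
      exact ⟨cur, r, rs, by simp [pvRuns, hp, hr]⟩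

-- ===== VERDICT (by name: the statement is the Claim_ definition above) =====
theorem get_min_demand_interval_length_spec : Claim_unchanged_get_min_demand_interval_length := by
  unfold Claim_unchanged_get_min_demand_interval_length
  intro xs _
  unfold Spec_get_min_demand_interval_length
  intro hnD
  by_cases hnil : xs = []
  · subst hnil; rfl
  · have hbad : ∃ p ∈ xs.zip xs.tail, p.2 - p.1 ≠ 1 := by
      by_contra hall
      refine hnD ⟨hnil, fun p hp => ?_⟩
      by_contra hne
      exact hall ⟨p, hp, hne⟩
    rw [pvA_eq xs, pvB_eq xs hnil, pvA_zero (xs.zip xs.tail) 1 (by omega)]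
    obtain ⟨r, r', rs, hr⟩ := pvRuns_has_two (xs.zip xs.tail) 1 hbad
    rw [hr]

theorem get_min_demand_interval_length_changed : Claim_changed_get_min_demand_interval_length := by
  unfold Claim_changed_get_min_demand_interval_length; decide

theorem get_min_demand_interval_length_tight : Claim_exact_get_min_demand_interval_length := by
  unfold Claim_exact_get_min_demand_interval_length
  intro xs _ hD
  obtain ⟨hnil, hall⟩ := hD
  have hruns := pvRuns_all_good (xs.zip xs.tail) 1 hall
  rw [pvA_eq xs, pvB_eq xs hnil, pvA_zero (xs.zip xs.tail) 1 (by omega), hruns]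
  intro hcontra
  simp only [List.foldl_nil] at hcontra
  have hc : (0 : Int) = 1 + ((xs.zip xs.tail).length : Int) := hcontra
  omega
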